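-- pv_equiv track=rewrite | github.com/kryzp/advent-of-code | 2023/Day09/part1.py | solve
-- ===== SOURCE A (Python) =====
-- def solve(data):
-- 	constant = True
-- 	for i in range(len(data) - 1):
-- 		if data[i] != data[i + 1]:
-- 			constant = False
-- 			break
-- 	if constant:
-- 		return data[-1]
-- 	deltas = []
-- 	for i in range(len(data) - 1):
-- 		deltas.append(data[i + 1] - data[i])
-- 	return data[-1] + solve(deltas)
-- ===== SOURCE B (Python) =====
-- def solve(data):
--     n = len(data)
--     total = 0
--     c = 1                               # running binomial C(n, k)
--     sign = -1 if n % 2 == 0 else 1      # (-1) ** (n - 1 - k), starting at k = 0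
--     for k in range(n):
--         total += sign * c * data[k]
--         c = c * (n - k) // (k + 1)
--         sign = -sign
--     return total
-- ===== Notes on version B (the rewrite author's own statement) =====
-- stated objective: faster
-- what changed: Replaced the recursive repeated-difference-sequence extrapolation by the Newton forward-difference closed form: a single pass summing data[k] * (-1)^(n-1-k) * C(n,k) with the binomial coefficient updated multiplicatively.
import Mathlib
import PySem

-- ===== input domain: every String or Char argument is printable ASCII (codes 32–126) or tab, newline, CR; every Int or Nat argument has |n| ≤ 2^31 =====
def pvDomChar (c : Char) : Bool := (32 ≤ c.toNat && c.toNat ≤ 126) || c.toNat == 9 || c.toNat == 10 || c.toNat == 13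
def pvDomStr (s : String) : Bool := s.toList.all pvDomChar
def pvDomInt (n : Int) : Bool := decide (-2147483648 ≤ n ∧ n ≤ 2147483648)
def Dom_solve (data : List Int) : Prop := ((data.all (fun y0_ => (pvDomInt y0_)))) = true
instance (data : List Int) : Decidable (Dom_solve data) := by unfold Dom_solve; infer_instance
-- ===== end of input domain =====

-- B replaces A's O(n^2) recursive difference-sequence extrapolation by the O(n) Newton
-- forward-difference closed form (one pass, binomial coefficient updated multiplicatively).

-- ===== PORT A =====
-- the 'constant' scan with break: checks adjacent pairs in order, stops at first mismatch
def pvAllEq : List Int → Bool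
  | a :: b :: rest => if a = b then pvAllEq (b :: rest) else false
  | _ => true

-- the deltas-building loop: data[i+1] - data[i]
def pvDeltas : List Int → List Int
  | a :: b :: rest => (b - a) :: pvDeltas (b :: rest)
  | _ => []

theorem pvDeltas_length (l : List Int) : (pvDeltas l).length = l.length - 1 := by
  induction l with
  | nil => simp [pvDeltas]
  | cons a t ih =>
    cases t with
    | nil => simp [pvDeltas]
    | cons b r => simp [pvDeltas] at ih ⊢; omega

theorem pvAllEq_ne_nil {l : List Int} (h : pvAllEq l = false) : l ≠ [] := by
  intro hl; subst hl; simp [pvAllEq] at h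

def solve (data : List Int) : Int :=
  if pvAllEq data then PySem.List.pyGetD data (-1) 0
  else PySem.List.pyGetD data (-1) 0 + solve (pvDeltas data)
termination_by data.length
decreasing_by
  have h1 := pvDeltas_length data
  have h2 := pvAllEq_ne_nil (by simpa using (by assumption : ¬ pvAllEq data = true))
  have : 0 < data.length := List.length_pos_iff.mpr h2
  omega

-- ===== PORT B =====
def solve_alt (data : List Int) : Int :=
  let n : Int := data.length
  let sign0 : Int := if PySem.Int.mod n 2 = 0 then -1 else 1
  let r := (PySem.List.pyRange 0 n 1).foldl
    (fun (st : Int × Int × Int) (k : Int) =>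
      (st.1 + st.2.2 * st.2.1 * PySem.List.pyGetD data k 0,
       PySem.Int.floordiv (st.2.1 * (n - k)) (k + 1),
       -st.2.2))
    (0, 1, sign0)
  r.1

-- ===== PRECONDITION & SPEC =====
-- Pre_ excludes only the empty list, on which A raises IndexError (data[-1]).
def Pre_solve (data : List Int) : Prop := data ≠ []
instance (data : List Int) : Decidable (Pre_solve data) := by unfold Pre_solve; infer_instance
def pvWitness_solve : List Int := [1, 3, 6, 10]

def Spec_solve (data : List Int) (out : Int) : Prop := out = solve_alt data
instance (data : List Int) (out : Int) : Decidable (Spec_solve data out) := by unfold Spec_solve; infer_instance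

-- ===== CLAIM (what is proved, stated in full; the proofs are below) =====
def Claim_equal_solve : Prop := ∀ (data : List Int), Dom_solve data → Pre_solve data → Spec_solve data (solve data)

-- ===== LEMMAS AND PROOFS =====

-- the Newton closed form both programs compute
def pvN (l : List Int) : Int :=
  ∑ k ∈ Finset.range l.length, (-1 : Int) ^ (l.length - 1 + k) * (l.length.choose k) * l.getD k 0

theorem fold_inv (l : List Int) (m : ℕ) (hm : m ≤ l.length) :
    (PySem.List.pyRange 0 (m : Int) 1).foldl
      (fun (st : Int × Int × Int) (k : Int) =>
        (st.1 + st.2.2 * st.2.1 * PySem.List.pyGetD l k 0,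
         PySem.Int.floordiv (st.2.1 * ((l.length : Int) - k)) (k + 1),
         -st.2.2))
      (0, 1, (-1 : Int) ^ (l.length - 1))
    = (∑ k ∈ Finset.range m, (-1 : Int) ^ (l.length - 1 + k) * (l.length.choose k) * l.getD k 0,
       ((l.length.choose m : Int)), (-1 : Int) ^ (l.length - 1 + m)) := by
  induction m with
  | zero =>
    rw [show ((0 : ℕ) : Int) = 0 from rfl, PySem.List.pyRange_one_eq_nil le_rfl]
    simp
  | succ m ih =>
    have hmlt : m < l.length := by omega
    have h0m : (0 : Int) ≤ (m : Int) := by positivity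
    rw [show ((m + 1 : ℕ) : Int) = (m : Int) + 1 by push_cast; ring,
        PySem.List.pyRange_one_succ_right h0m, List.foldl_append, ih (by omega)]
    simp only [List.foldl_cons, List.foldl_nil]
    refine Prod.ext ?_ (Prod.ext ?_ ?_)
    · simp only [Finset.sum_range_succ, PySem.List.pyGetD_natCast]
    · show PySem.Int.floordiv ((l.length.choose m : Int) * ((l.length : Int) - (m : Int))) ((m : Int) + 1)
          = (l.length.choose (m + 1) : Int)
      have hsub : ((l.length : Int) - (m : Int)) = ((l.length - m : ℕ) : Int) := by
        push_cast [Nat.cast_sub (le_of_lt hmlt)]; ring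
      rw [hsub, show ((m : Int) + 1) = ((m + 1 : ℕ) : Int) by push_cast; ring,
          ← Nat.cast_mul, PySem.Int.floordiv_natCast]
      rw [← Nat.choose_succ_right_eq, Nat.mul_div_cancel _ (Nat.succ_pos m)]
    · show -(-1 : Int) ^ (l.length - 1 + m) = (-1 : Int) ^ (l.length - 1 + (m + 1))
      rw [show l.length - 1 + (m + 1) = (l.length - 1 + m) + 1 by omega, pow_succ]
      ring_nf

theorem alt_eq_N (l : List Int) : solve_alt l = pvN l := by
  rcases eq_or_ne l [] with rfl | hne
  · simp [solve_alt, pvN, PySem.List.pyRange_one_eq_nil le_rfl]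
  · have hn1 : 1 ≤ l.length := List.length_pos_iff.mpr hne
    have hsign : (if PySem.Int.mod (l.length : Int) 2 = 0 then (-1 : Int) else 1)
        = (-1 : Int) ^ (l.length - 1) := by
      rw [show (2 : Int) = ((2 : ℕ) : Int) from rfl, PySem.Int.mod_natCast]
      rcases Nat.even_or_odd l.length with he | ho
      · have h2 : l.length % 2 = 0 := Nat.even_iff.mp he
        have : Odd (l.length - 1) := by
          rcases he with ⟨c, hc⟩; exact ⟨c - 1, by omega⟩
        simp [h2, Odd.neg_one_pow this]
      · have h2 : l.length % 2 = 1 := Nat.odd_iff.mp ho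
        have : Even (l.length - 1) := by
          rcases ho with ⟨c, hc⟩; exact ⟨c, by omega⟩
        simp [h2, Even.neg_one_pow this]
    show ((PySem.List.pyRange 0 (l.length : Int) 1).foldl _
      (0, 1, if PySem.Int.mod (l.length : Int) 2 = 0 then (-1 : Int) else 1)).1 = pvN l
    rw [hsign, fold_inv l l.length le_rfl]
    simp [pvN]

theorem pvAllEq_const : ∀ (l : List Int), pvAllEq l = true → ∀ k < l.length, l.getD k 0 = l.getD 0 0 := by
  intro l
  induction l with
  | nil => intro _ k hk; simp at hk
  | cons a t ih =>
    cases t with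
    | nil =>
      intro _ k hk
      cases k with
      | zero => rfl
      | succ k => simp at hk
    | cons b r =>
      intro h k hk
      rw [pvAllEq] at h
      by_cases hab : a = b
      · simp only [hab, if_true] at h
        cases k with
        | zero => rfl
        | succ k =>
          have := ih h k (by simpa using hk)
          simp only [List.getD_cons_succ]
          rw [this, List.getD_cons_zero, List.getD_cons_zero, hab]
      · simp [hab] at h

theorem pvAllEq_false_len {l : List Int} (h : pvAllEq l = false) : 2 ≤ l.length := by
  match l with
  | [] => simp [pvAllEq] at h
  | [a] => simp [pvAllEq] at h
  | a :: b :: r => simp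

theorem sum_w_one (n : ℕ) (hn : 1 ≤ n) :
    ∑ k ∈ Finset.range n, (-1 : Int) ^ (n - 1 + k) * (n.choose k) = 1 := by
  obtain ⟨m, rfl⟩ : ∃ m, n = m + 1 := ⟨n - 1, by omega⟩
  simp only [Nat.add_sub_cancel]
  have halt := Int.alternating_sum_range_choose (n := m + 1)
  rw [if_neg (by omega)] at halt
  rw [Finset.sum_range_succ] at halt
  -- halt : ∑ k ∈ range (m+1), (-1)^k * C(m+1,k) + (-1)^(m+1) * C(m+1,m+1) = 0
  have hsum : ∑ k ∈ Finset.range (m + 1), (-1 : Int) ^ k * ((m + 1).choose k)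
      = -((-1 : Int) ^ (m + 1)) := by
    simp only [Nat.choose_self, Nat.cast_one, mul_one] at halt
    linarith
  calc ∑ k ∈ Finset.range (m + 1), (-1 : Int) ^ (m + k) * ((m + 1).choose k)
      = (-1 : Int) ^ m * ∑ k ∈ Finset.range (m + 1), (-1 : Int) ^ k * ((m + 1).choose k) := by
        rw [Finset.mul_sum]
        exact Finset.sum_congr rfl fun k _ => by rw [pow_add]; ring
    _ = (-1 : Int) ^ m * -((-1 : Int) ^ (m + 1)) := by rw [hsum]
    _ = ((-1 : Int) ^ m) ^ 2 := by rw [pow_succ]; ring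
    _ = 1 := by rw [← pow_mul]; exact Even.neg_one_pow ⟨m, by ring⟩

theorem pvDeltas_getD : ∀ (l : List Int) (k : ℕ), k + 1 < l.length →
    (pvDeltas l).getD k 0 = l.getD (k + 1) 0 - l.getD k 0 := by
  intro l
  induction l with
  | nil => intro k hk; simp at hk
  | cons a t ih =>
    cases t with
    | nil => intro k hk; simp at hk
    | cons b r =>
      intro k hk
      cases k with
      | zero => simp [pvDeltas]
      | succ k =>
        simp only [pvDeltas, List.getD_cons_succ]
        exact ih k (by simpa using hk)

theorem newton_pascal (m : ℕ) (f : ℕ → Int) :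
    ∑ k ∈ Finset.range (m + 2), (-1 : Int) ^ (m + 1 + k) * ((m + 2).choose k) * f k
    = f (m + 1) + ∑ k ∈ Finset.range (m + 1), (-1 : Int) ^ (m + k) * ((m + 1).choose k) * (f (k + 1) - f k) := by
  have hp2 : ∀ a : ℕ, (-1 : Int) ^ (a + 2) = (-1 : Int) ^ a := fun a => by rw [pow_add]; ring
  -- names for the pieces
  set A1 := ∑ k ∈ Finset.range (m + 1), (-1 : Int) ^ (m + k) * ((m + 1).choose k) * f (k + 1) with hA1
  set A2 := ∑ k ∈ Finset.range (m + 1), (-1 : Int) ^ (m + k) * ((m + 1).choose k) * f k with hA2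
  set B1 := ∑ k ∈ Finset.range (m + 1), (-1 : Int) ^ (m + k) * ((m + 1).choose (k + 1)) * f (k + 1) with hB1
  -- the shifted sum of H k := (-1)^(m+1+k) * C(m+1,k) * f k
  have hH := Finset.sum_range_succ' (fun k => (-1 : Int) ^ (m + 1 + k) * ((m + 1).choose k) * f k) (m + 1)
  have hHsucc : ∑ k ∈ Finset.range (m + 1),
      (-1 : Int) ^ (m + 1 + (k + 1)) * ((m + 1).choose (k + 1)) * f (k + 1) = B1 := by
    rw [hB1]
    refine Finset.sum_congr rfl fun k _ => ?_
    rw [show m + 1 + (k + 1) = m + k + 2 by omega, hp2]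
  have hHfull : ∑ k ∈ Finset.range (m + 2), (-1 : Int) ^ (m + 1 + k) * ((m + 1).choose k) * f k
      = -A2 + f (m + 1) := by
    rw [Finset.sum_range_succ]
    have h1 : ∑ k ∈ Finset.range (m + 1), (-1 : Int) ^ (m + 1 + k) * ((m + 1).choose k) * f k = -A2 := by
      rw [hA2, ← Finset.sum_neg_distrib]
      refine Finset.sum_congr rfl fun k _ => ?_
      rw [show m + 1 + k = m + k + 1 by omega, pow_succ]
      ring
    rw [h1, Nat.choose_self, show m + 1 + (m + 1) = 2 * (m + 1) by omega]
    simp [pow_mul]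
  have hB1eq : B1 = -A2 + f (m + 1) - (-1 : Int) ^ (m + 1) * f 0 := by
    rw [← hHsucc]
    have := hH
    simp only [Nat.choose_zero_right, Nat.cast_one, mul_one, Nat.add_zero] at this
    rw [hHfull] at this
    linarith [this]
  -- expand the LHS
  rw [Finset.sum_range_succ' (fun k => (-1 : Int) ^ (m + 1 + k) * ((m + 2).choose k) * f k) (m + 1)]
  have hsplit : ∑ k ∈ Finset.range (m + 1),
      (-1 : Int) ^ (m + 1 + (k + 1)) * ((m + 2).choose (k + 1)) * f (k + 1) = A1 + B1 := by
    rw [hA1, hB1, ← Finset.sum_add_distrib]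
    refine Finset.sum_congr rfl fun k _ => ?_
    rw [show m + 1 + (k + 1) = m + k + 2 by omega, hp2, Nat.choose_succ_succ]
    push_cast
    ring
  rw [hsplit]
  have hRHS : ∑ k ∈ Finset.range (m + 1), (-1 : Int) ^ (m + k) * ((m + 1).choose k) * (f (k + 1) - f k)
      = A1 - A2 := by
    rw [hA1, hA2, ← Finset.sum_sub_distrib]
    exact Finset.sum_congr rfl fun k _ => by ring
  rw [hRHS, hB1eq]
  simp only [Nat.choose_zero_right, Nat.cast_one, mul_one, Nat.add_zero]
  ring

theorem pvN_step (l : List Int) (h2 : 2 ≤ l.length) :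
    pvN l = l.getD (l.length - 1) 0 + pvN (pvDeltas l) := by
  obtain ⟨m, hm⟩ : ∃ m, l.length = m + 2 := ⟨l.length - 2, by omega⟩
  have hd : (pvDeltas l).length = m + 1 := by rw [pvDeltas_length]; omega
  unfold pvN
  rw [hm, hd]
  simp only [Nat.add_sub_cancel]
  have hdsum : ∑ k ∈ Finset.range (m + 1), (-1 : Int) ^ (m + k) * ((m + 1).choose k) * (pvDeltas l).getD k 0
      = ∑ k ∈ Finset.range (m + 1), (-1 : Int) ^ (m + k) * ((m + 1).choose k) * (l.getD (k + 1) 0 - l.getD k 0) := by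
    refine Finset.sum_congr rfl fun k hk => ?_
    rw [pvDeltas_getD l k (by rw [hm]; exact Nat.add_lt_add_right (Finset.mem_range.mp hk) 1)]
  have h21 : m + 2 - 1 = m + 1 := rfl
  rw [hdsum, h21]
  exact newton_pascal m (fun k => l.getD k 0)

theorem pyGetD_last (l : List Int) (h : l ≠ []) :
    PySem.List.pyGetD l (-1) 0 = l.getD (l.length - 1) 0 := by
  rw [PySem.List.pyGetD_neg_one (h := h), List.getLast_eq_getElem,
      List.getD_eq_getElem l 0 (by have := List.length_pos_iff.mpr h; omega)]

theorem solve_eq_N_aux : ∀ (n : ℕ) (l : List Int), l.length = n → l ≠ [] → solve l = pvN l := by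
  intro n
  induction n using Nat.strong_induction_on with
  | _ n ih =>
    intro l hlen hne
    have hn1 : 1 ≤ l.length := List.length_pos_iff.mpr hne
    rw [solve]
    by_cases hc : pvAllEq l
    · rw [if_pos hc, pyGetD_last l hne]
      -- constant list: the Newton sum collapses since all entries equal l.getD 0 0
      have hconst := pvAllEq_const l hc
      have hlast : l.getD (l.length - 1) 0 = l.getD 0 0 := hconst _ (by omega)
      unfold pvN
      rw [hlast]
      symm
      calc ∑ k ∈ Finset.range l.length, (-1 : Int) ^ (l.length - 1 + k) * (l.length.choose k) * l.getD k 0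
          = (∑ k ∈ Finset.range l.length, (-1 : Int) ^ (l.length - 1 + k) * (l.length.choose k)) * l.getD 0 0 := by
            rw [Finset.sum_mul]
            exact Finset.sum_congr rfl fun k hk => by
              rw [hconst k (Finset.mem_range.mp hk)]
        _ = l.getD 0 0 := by rw [sum_w_one l.length hn1, one_mul]
    · rw [if_neg hc, pyGetD_last l hne]
      have h2 : 2 ≤ l.length := pvAllEq_false_len (by simpa using hc)
      have hdne : pvDeltas l ≠ [] := by
        have := pvDeltas_length l
        intro h0
        rw [h0] at this
        simp at this
        omega
      rw [ih (pvDeltas l).length (by rw [pvDeltas_length]; omega) (pvDeltas l) rfl hdne,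
          pvN_step l h2]

theorem solve_eq_N (l : List Int) (h : l ≠ []) : solve l = pvN l :=
  solve_eq_N_aux l.length l rfl h

-- ===== VERDICT (by name: the statement is the Claim_ definition above) =====
theorem solve_spec : Claim_equal_solve := by
  intro data _ hpre
  unfold Spec_solve
  rw [alt_eq_N, solve_eq_N data hpre]
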